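-- pv_equiv track=rewrite | github.com/maxmarvell/shades | src/shades/tomography/matchgate.py | _canonicalize_majorana_product
-- ===== SOURCE A (Python) =====
-- def _canonicalize_majorana_product(indices: list[int]) -> tuple[int, list[int]]:
--     """Canonicalise γ_{i1} γ_{i2} ... γ_{ik} into sign * γ_S with S sorted.
--
--     Handles anticommutation ({γ_μ, γ_ν} = 2δ_{μν}) by sorting and cancelling
--     repeated pairs (γ_μ² = I).
--
--     Returns (sign, sorted_indices) where sign is ±1.
--     """
--     indices = list(indices)
--     n = len(indices)
--
--     # Count inversions (each swap = sign flip due to anticommutation)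
--     sign = 1
--     for i in range(n):
--         for j in range(i + 1, n):
--             if indices[i] > indices[j]:
--                 sign *= -1
--
--     sorted_idx = sorted(indices)
--
--     # Cancel adjacent duplicate pairs (γ_μ² = I)
--     result = []
--     i = 0
--     while i < len(sorted_idx):
--         if i + 1 < len(sorted_idx) and sorted_idx[i] == sorted_idx[i + 1]:
--             i += 2
--         else:
--             result.append(sorted_idx[i])
--             i += 1
--
--     return sign, result
-- ===== SOURCE B (Python) =====
-- def _canonicalize_majorana_product(indices: list[int]) -> tuple[int, list[int]]:
--     """Canonicalise gamma_{i1}...gamma_{ik} into sign * gamma_S with S sorted.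
--
--     Merge sort counting inversions (O(n log n)), then stack-cancel equal pairs.
--     Returns (sign, sorted_indices) with sign = +-1.
--     """
--     def msort(a):
--         if len(a) <= 1:
--             return a, 0
--         m = len(a) // 2
--         left, inv_l = msort(a[:m])
--         right, inv_r = msort(a[m:])
--         merged = []
--         inv = inv_l + inv_r
--         i = j = 0
--         while i < len(left) and j < len(right):
--             if left[i] <= right[j]:
--                 merged.append(left[i])
--                 i += 1
--             else:
--                 merged.append(right[j])
--                 j += 1
--                 inv += len(left) - i
--         merged.extend(left[i:])
--         merged.extend(right[j:])
--         return merged, inv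
--
--     srt, inv = msort(list(indices))
--
--     # cancel equal adjacent pairs with a stack
--     out = []
--     for x in srt:
--         if out and out[-1] == x:
--             out.pop()
--         else:
--             out.append(x)
--
--     return (-1 if inv % 2 else 1), out
-- ===== Notes on version B (the rewrite author's own statement) =====
-- stated objective: faster
-- what changed: Replaces the O(n^2) nested-loop inversion count with merge-sort inversion counting (which also yields the sorted list in one pass) and the indexed adjacent-pair skip with a single stack-based cancellation pass.
import Mathlib
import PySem

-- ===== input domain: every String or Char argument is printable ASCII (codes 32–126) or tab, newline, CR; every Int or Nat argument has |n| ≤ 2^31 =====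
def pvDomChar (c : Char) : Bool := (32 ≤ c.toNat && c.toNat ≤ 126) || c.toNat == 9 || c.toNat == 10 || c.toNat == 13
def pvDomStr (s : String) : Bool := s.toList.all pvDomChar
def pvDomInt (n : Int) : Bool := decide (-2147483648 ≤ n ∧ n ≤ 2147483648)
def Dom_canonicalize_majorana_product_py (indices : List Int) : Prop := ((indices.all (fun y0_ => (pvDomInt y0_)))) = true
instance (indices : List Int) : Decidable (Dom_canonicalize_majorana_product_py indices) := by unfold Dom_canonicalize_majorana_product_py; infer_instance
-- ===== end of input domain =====

-- B replaces A's O(n^2) nested-loop inversion count by merge-sort inversion counting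
-- (which also produces the sorted list) and the indexed pair-skip by a stack cancellation pass.

-- ===== PORT A =====
-- the while loop over sorted_idx: skip an equal adjacent pair, else keep the element
def pvCancelA : List Int → List Int
  | a :: b :: rest => if a = b then pvCancelA rest else a :: pvCancelA (b :: rest)
  | [a] => [a]
  | [] => []

def canonicalize_majorana_product_py (indices : List Int) : Int × List Int :=
  let n := indices.length
  let sign : Int :=
    (PySem.List.pyRange 0 (n : Int) 1).foldl (fun s i =>
      (PySem.List.pyRange (i + 1) (n : Int) 1).foldl (fun s j =>
        if PySem.List.pyGetD indices i 0 > PySem.List.pyGetD indices j 0 then s * (-1) else s) s) 1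
  let sorted_idx := PySem.List.sorted indices (fun x => x) false
  (sign, pvCancelA sorted_idx)

-- ===== PORT B =====
-- merge step of Source B's msort: merge two runs, counting cross inversions
def pvMerge : List Int → List Int → List Int × Nat
  | [], r => (r, 0)
  | a :: l, [] => (a :: l, 0)
  | a :: l, b :: r =>
    if a ≤ b then
      let p := pvMerge l (b :: r)
      (a :: p.1, p.2)
    else
      let p := pvMerge (a :: l) r
      (b :: p.1, p.2 + (a :: l).length)
termination_by l r => l.length + r.length

-- Source B's msort: split in half, recurse, merge with inversion count
def pvMsort (a : List Int) : List Int × Nat :=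
  if a.length ≤ 1 then (a, 0)
  else
    let m := a.length / 2
    let pl := pvMsort (a.take m)
    let pr := pvMsort (a.drop m)
    let pm := pvMerge pl.1 pr.1
    (pm.1, pl.2 + pr.2 + pm.2)
termination_by a.length
decreasing_by
  · simp [List.length_take]; omega
  · simp [List.length_drop]; omega

-- Source B's stack cancellation (stack top kept at the head; result reversed at the end)
def pvStackStep (out : List Int) (x : Int) : List Int :=
  match out with
  | y :: rest => if y = x then rest else x :: y :: rest
  | [] => [x]

def pvStack (srt : List Int) : List Int :=
  (srt.foldl pvStackStep []).reverse

def canonicalize_majorana_product_py_alt (indices : List Int) : Int × List Int :=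
  let p := pvMsort indices
  ((if p.2 % 2 = 1 then -1 else 1), pvStack p.1)

-- ===== PRECONDITION & SPEC =====
def Spec_canonicalize_majorana_product_py (indices : List Int) (out : Int × List Int) : Prop := out = canonicalize_majorana_product_py_alt indices
instance (indices : List Int) (out : Int × List Int) : Decidable (Spec_canonicalize_majorana_product_py indices out) := by unfold Spec_canonicalize_majorana_product_py; infer_instance

-- ===== CLAIM (what is proved, stated in full; the proofs are below) =====
def Claim_equal_canonicalize_majorana_product_py : Prop := ∀ (indices : List Int), Dom_canonicalize_majorana_product_py indices → Spec_canonicalize_majorana_product_py indices (canonicalize_majorana_product_py indices)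

-- ===== LEMMAS AND PROOFS =====

-- number of inversions of a list (structural form)
def pvInv : List Int → Nat
  | [] => 0
  | a :: l => l.countP (fun y => decide (y < a)) + pvInv l

-- cross inversions between two lists
def pvCross (l r : List Int) : Nat := (l.map (fun a => r.countP (fun y => decide (y < a)))).sum

theorem pvInv_append (l r : List Int) : pvInv (l ++ r) = pvInv l + pvInv r + pvCross l r := by
  induction l with
  | nil => simp [pvInv, pvCross]
  | cons a l ih => simp [pvInv, pvCross, List.countP_append, ih, pvCross]; omega

theorem pvCross_perm_left {l l' : List Int} (h : l.Perm l') (r : List Int) :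
    pvCross l r = pvCross l' r := by
  unfold pvCross; exact List.Perm.sum_eq (h.map _)

theorem pvCross_perm_right (l : List Int) {r r' : List Int} (h : r.Perm r') :
    pvCross l r = pvCross l r' := by
  unfold pvCross
  congr 1
  exact List.map_congr_left (fun a _ => h.countP_eq _)

theorem pvMerge_perm (l r : List Int) : (pvMerge l r).1.Perm (l ++ r) := by
  match l, r with
  | [], r => simp [pvMerge]
  | a :: l, [] => simp [pvMerge]
  | a :: l, b :: r =>
    unfold pvMerge
    split
    · exact ((pvMerge_perm l (b :: r)).cons a)
    · exact ((pvMerge_perm (a :: l) r).cons b).trans List.perm_middle.symm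
termination_by l.length + r.length

theorem pvMerge_mem {l r : List Int} {x : Int} (h : x ∈ (pvMerge l r).1) :
    x ∈ l ∨ x ∈ r := by
  have := (pvMerge_perm l r).mem_iff.mp h
  simpa using this

theorem pvMerge_sorted {l r : List Int} (hl : l.Pairwise (· ≤ ·)) (hr : r.Pairwise (· ≤ ·)) :
    (pvMerge l r).1.Pairwise (· ≤ ·) := by
  match l, r with
  | [], r => simpa [pvMerge] using hr
  | a :: l, [] => simpa [pvMerge] using hl
  | a :: l, b :: r =>
    unfold pvMerge
    rw [List.pairwise_cons] at hl hr
    split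
    · rename_i hab
      simp only [List.pairwise_cons]
      refine ⟨fun x hx => ?_, pvMerge_sorted hl.2 (List.pairwise_cons.mpr hr)⟩
      rcases pvMerge_mem hx with h | h
      · exact hl.1 x h
      · rcases List.mem_cons.mp h with rfl | h
        · exact hab
        · exact le_trans hab (hr.1 x h)
    · rename_i hab
      push Not at hab
      simp only [List.pairwise_cons]
      refine ⟨fun x hx => ?_, pvMerge_sorted (List.pairwise_cons.mpr hl) hr.2⟩
      rcases pvMerge_mem hx with h | h
      · rcases List.mem_cons.mp h with rfl | h
        · exact le_of_lt hab
        · exact le_trans (le_of_lt hab) (hl.1 x h)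
      · exact hr.1 x h
termination_by l.length + r.length

theorem pvMerge_count {l r : List Int} (hl : l.Pairwise (· ≤ ·)) (hr : r.Pairwise (· ≤ ·)) :
    (pvMerge l r).2 = pvCross l r := by
  match l, r with
  | [], r => simp [pvMerge, pvCross]
  | a :: l, [] => simp [pvMerge, pvCross]
  | a :: l, b :: r =>
    unfold pvMerge
    rw [List.pairwise_cons] at hl hr
    split
    · rename_i hab
      have hcnt : (b :: r).countP (fun y => decide (y < a)) = 0 := by
        rw [List.countP_eq_zero]
        intro y hy
        rcases List.mem_cons.mp hy with rfl | hy
        · simpa using not_lt.mpr hab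
        · simpa using not_lt.mpr (le_trans hab (hr.1 y hy))
      have ih := pvMerge_count (l := l) (r := b :: r) hl.2 (List.pairwise_cons.mpr hr)
      simp only [ih, pvCross, List.map_cons, List.sum_cons, hcnt]
      omega
    · rename_i hab
      push Not at hab
      have ih := pvMerge_count (l := a :: l) (r := r) (List.pairwise_cons.mpr hl) hr.2
      have hsplit : ∀ x ∈ a :: l, (b :: r).countP (fun y => decide (y < x))
          = r.countP (fun y => decide (y < x)) + 1 := by
        intro x hx
        have hbx : b < x := by
          rcases List.mem_cons.mp hx with rfl | hx
          · exact hab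
          · exact lt_of_lt_of_le hab (hl.1 x hx)
        simp [hbx]
      simp only [ih, pvCross]
      rw [List.map_congr_left hsplit, List.sum_map_add]
      simp [List.map_const', List.sum_replicate]
      omega
termination_by l.length + r.length

theorem pvMsort_perm (a : List Int) : (pvMsort a).1.Perm a := by
  unfold pvMsort
  split
  · exact List.Perm.refl a
  · rename_i h
    have h1 : (a.take (a.length / 2)).length < a.length := by simp [List.length_take]; omega
    have h2 : (a.drop (a.length / 2)).length < a.length := by simp [List.length_drop]; omega
    have := (pvMerge_perm (pvMsort (a.take (a.length / 2))).1 (pvMsort (a.drop (a.length / 2))).1)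
    refine this.trans ?_
    refine (((pvMsort_perm _).append (pvMsort_perm _)).trans ?_)
    rw [List.take_append_drop]
termination_by a.length

theorem pvMsort_sorted (a : List Int) : (pvMsort a).1.Pairwise (· ≤ ·) := by
  unfold pvMsort
  split
  · rename_i h
    match a, h with
    | [], _ => simp
    | [x], _ => simp
  · rename_i h
    have h1 : (a.take (a.length / 2)).length < a.length := by simp [List.length_take]; omega
    have h2 : (a.drop (a.length / 2)).length < a.length := by simp [List.length_drop]; omega
    exact pvMerge_sorted (pvMsort_sorted _) (pvMsort_sorted _)
termination_by a.length

theorem pvInv_short {a : List Int} (h : a.length ≤ 1) : pvInv a = 0 := by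
  match a, h with
  | [], _ => rfl
  | [x], _ => simp [pvInv]

theorem pvMsort_count (a : List Int) : (pvMsort a).2 = pvInv a := by
  unfold pvMsort
  split
  · rename_i h
    exact (pvInv_short h).symm
  · rename_i h
    have h1 : (a.take (a.length / 2)).length < a.length := by simp [List.length_take]; omega
    have h2 : (a.drop (a.length / 2)).length < a.length := by simp [List.length_drop]; omega
    have hm := pvMerge_count (pvMsort_sorted (a.take (a.length / 2)))
      (pvMsort_sorted (a.drop (a.length / 2)))
    have hc : pvCross (pvMsort (a.take (a.length / 2))).1 (pvMsort (a.drop (a.length / 2))).1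
        = pvCross (a.take (a.length / 2)) (a.drop (a.length / 2)) := by
      rw [pvCross_perm_left (pvMsort_perm _), pvCross_perm_right _ (pvMsort_perm _)]
    have := pvInv_append (a.take (a.length / 2)) (a.drop (a.length / 2))
    rw [List.take_append_drop] at this
    simp only [hm, hc, pvMsort_count (a.take (a.length / 2)), pvMsort_count (a.drop (a.length / 2))]
    omega
termination_by a.length

theorem pvMsort_eq_sorted (a : List Int) :
    (pvMsort a).1 = PySem.List.sorted a (fun x => x) false :=
  (PySem.List.sorted_id_eq_of_perm_of_pairwise a (pvMsort a).1 (pvMsort_perm a) (pvMsort_sorted a)).symm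

-- A's inner loop computes s * (-1)^(# later elements smaller than x)
theorem pvInner (l : List Int) (x : Int) (a : Nat) (s : Int) :
    (PySem.List.pyRange (a : Int) (l.length : Int) 1).foldl
      (fun s j => if x > PySem.List.pyGetD l j 0 then s * (-1) else s) s
    = s * (-1) ^ ((l.drop a).countP (fun y => decide (y < x))) := by
  by_cases h : a < l.length
  · rw [PySem.List.pyRange_one_cons (by exact_mod_cast h)]
    rw [List.foldl_cons]
    have hget : PySem.List.pyGetD l (a : Int) 0 = l[a] := by
      rw [PySem.List.pyGetD_natCast]
      exact List.getD_eq_getElem l 0 h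
    have hdrop : l.drop a = l[a] :: l.drop (a + 1) := List.drop_eq_getElem_cons h
    have ih := pvInner l x (a + 1) (if x > PySem.List.pyGetD l (a : Int) 0 then s * (-1) else s)
    rw [show ((a : Int) + 1) = ((a + 1 : Nat) : Int) by push_cast; ring]
    rw [ih, hget, hdrop, List.countP_cons]
    simp only [gt_iff_lt, decide_eq_true_eq]
    by_cases hx : l[a] < x
    · rw [if_pos hx, if_pos hx, pow_add]; ring
    · rw [if_neg hx, if_neg hx]
      norm_num
  · have hempty : PySem.List.pyRange (a : Int) (l.length : Int) 1 = [] := by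
      rw [PySem.List.pyRange_one]
      have : ((l.length : Int) - (a : Int)).toNat = 0 := by omega
      simp [this]
    have hdrop : l.drop a = [] := List.drop_eq_nil_of_le (by omega)
    simp [hempty, hdrop]
termination_by l.length - a

-- A's outer loop computes s * (-1)^(inversions of the suffix)
theorem pvOuter (l : List Int) (a : Nat) (s : Int) :
    (PySem.List.pyRange (a : Int) (l.length : Int) 1).foldl (fun s i =>
      (PySem.List.pyRange (i + 1) (l.length : Int) 1).foldl (fun s j =>
        if PySem.List.pyGetD l i 0 > PySem.List.pyGetD l j 0 then s * (-1) else s) s) s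
    = s * (-1) ^ pvInv (l.drop a) := by
  by_cases h : a < l.length
  · rw [PySem.List.pyRange_one_cons (by exact_mod_cast h)]
    rw [List.foldl_cons]
    have hdrop : l.drop a = l[a] :: l.drop (a + 1) := List.drop_eq_getElem_cons h
    have hget : PySem.List.pyGetD l (a : Int) 0 = l[a] := by
      rw [PySem.List.pyGetD_natCast]
      exact List.getD_eq_getElem l 0 h
    have hinner := pvInner l (PySem.List.pyGetD l (a : Int) 0) (a + 1) s
    have ih := pvOuter l (a + 1)
      ((PySem.List.pyRange ((a : Int) + 1) (l.length : Int) 1).foldl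
        (fun s j => if PySem.List.pyGetD l (a : Int) 0 > PySem.List.pyGetD l j 0 then s * (-1) else s) s)
    push_cast at ih hinner ⊢
    rw [ih, hinner, hget, hdrop]
    rw [show pvInv (l[a] :: l.drop (a + 1))
        = (l.drop (a + 1)).countP (fun y => decide (y < l[a])) + pvInv (l.drop (a + 1)) from rfl]
    rw [pow_add]; ring
  · have hempty : PySem.List.pyRange (a : Int) (l.length : Int) 1 = [] := by
      rw [PySem.List.pyRange_one]
      have : ((l.length : Int) - (a : Int)).toNat = 0 := by omega
      simp [this]
    have hdrop : l.drop a = [] := List.drop_eq_nil_of_le (by omega)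
    simp [hempty, hdrop, pvInv]
termination_by l.length - a

theorem pvStack_shift (rest : List Int) (st : List Int) (a : Int)
    (h : ∀ x ∈ rest, x ≠ a) :
    rest.foldl pvStackStep (st ++ [a]) = (rest.foldl pvStackStep st) ++ [a] := by
  induction rest generalizing st with
  | nil => simp
  | cons x rest ih =>
    have hx : x ≠ a := h x (by simp)
    have hrest : ∀ y ∈ rest, y ≠ a := fun y hy => h y (by simp [hy])
    cases st with
    | nil =>
      simp [List.foldl_cons, pvStackStep, Ne.symm hx]
      exact ih [x] hrest
    | cons y st =>
      simp only [List.foldl_cons, pvStackStep, List.cons_append]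
      split
      · exact ih st hrest
      · exact ih (x :: y :: st) hrest

theorem pvCancel_eq_stack (s : List Int) (hs : s.Pairwise (· ≤ ·)) :
    pvCancelA s = pvStack s := by
  match s with
  | [] => rfl
  | [a] => rfl
  | a :: b :: rest =>
    by_cases hab : a = b
    · subst hab
      rw [show pvCancelA (a :: a :: rest) = pvCancelA rest by simp [pvCancelA]]
      rw [show pvStack (a :: a :: rest) = pvStack rest by
        simp [pvStack, pvStackStep]]
      exact pvCancel_eq_stack rest ((List.pairwise_cons.mp (List.pairwise_cons.mp hs).2).2)
    · have hlt : ∀ x ∈ b :: rest, x ≠ a := by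
        intro x hx
        rw [List.pairwise_cons] at hs
        have hax : a ≤ x := hs.1 x hx
        rcases List.mem_cons.mp hx with rfl | hx
        · exact fun hh => hab hh.symm
        · have hbx : b ≤ x := (List.pairwise_cons.mp hs.2).1 x hx
          have : a < b := lt_of_le_of_ne (hs.1 b (by simp)) hab
          exact fun hh => absurd (hh ▸ hbx) (not_le.mpr this)
      rw [show pvCancelA (a :: b :: rest) = a :: pvCancelA (b :: rest) by
        simp [pvCancelA, hab]]
      rw [pvCancel_eq_stack (b :: rest) (List.pairwise_cons.mp hs).2]
      rw [show pvStack (a :: b :: rest)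
          = ((b :: rest).foldl pvStackStep ([] ++ [a])).reverse by
        simp [pvStack, pvStackStep]]
      rw [pvStack_shift _ _ _ hlt]
      simp [pvStack]
termination_by s.length

theorem pvSign_eq (k : Nat) : ((-1 : Int)) ^ k = (if k % 2 = 1 then (-1 : Int) else 1) := by
  rcases Nat.even_or_odd k with h | h
  · rw [h.neg_one_pow]; simp [Nat.even_iff.mp h]
  · rw [h.neg_one_pow]; simp [Nat.odd_iff.mp h]

-- ===== VERDICT (by name: the statement is the Claim_ definition above) =====
theorem canonicalize_majorana_product_py_spec : Claim_equal_canonicalize_majorana_product_py := by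
  intro indices _
  unfold Spec_canonicalize_majorana_product_py
  unfold canonicalize_majorana_product_py canonicalize_majorana_product_py_alt
  simp only []
  have h1 := pvOuter indices 0 1
  simp only [Nat.cast_zero, List.drop_zero, one_mul] at h1
  have hpw : (PySem.List.sorted indices (fun x => x)).Pairwise (· ≤ ·) := by
    have := PySem.List.sorted_pairwise indices (fun x : Int => x)
    simpa using this
  rw [h1, pvMsort_count, pvSign_eq, pvMsort_eq_sorted,
    pvCancel_eq_stack _ hpw]
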